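-- pv_equiv track=rewrite | github.com/8bkmv4dm4z-source/Agentic-Workflows | src/agentic_workflows/orchestration/langgraph/mission_auditor.py | _estimate_fib_n_from_chars
-- ===== SOURCE A (Python) =====
-- def _estimate_fib_n_from_chars(char_count: int) -> int:
--     """Reverse-estimate how many fibonacci numbers fit in char_count chars."""
--     a, b = 0, 1
--     total = 0
--     i = 0
--     while True:
--         total += len(str(a))
--         if i > 0:
--             total += 1  # comma
--         if total > char_count:
--             return max(0, i)
--         i += 1
--         a, b = b, a + b
--         if i > 10000:
--             break
--     return i
-- ===== SOURCE B (Python) =====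
-- def _estimate_fib_n_from_chars(char_count: int) -> int:
--     """Reverse-estimate how many fibonacci numbers fit in char_count chars."""
--     # Stage 1: generate the first 10001 fibonacci numbers.
--     fibs = []
--     a, b = 0, 1
--     for _ in range(10001):
--         fibs.append(a)
--         a, b = b, a + b
--     # Stage 2: cumulative character totals (one comma before every entry after the first).
--     totals = []
--     acc = 0
--     for i, f in enumerate(fibs):
--         acc += len(str(f)) + (1 if i > 0 else 0)
--         totals.append(acc)
--     # Stage 3: totals is strictly increasing, so binary-search the first index
--     # whose total exceeds char_count; that index is the number of entries that fit.
--     lo, hi = 0, len(totals)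
--     while lo < hi:
--         mid = (lo + hi) // 2
--         if totals[mid] <= char_count:
--             lo = mid + 1
--         else:
--             hi = mid
--     return lo
-- ===== Notes on version B (the rewrite author's own statement) =====
-- stated objective: alternative
-- what changed: Replaces A's single early-return while-loop with three staged passes: generate the capped list of fibonacci numbers, fold it into the strictly increasing list of cumulative character totals, and binary-search that list for the first total exceeding char_count.
import Mathlib
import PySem

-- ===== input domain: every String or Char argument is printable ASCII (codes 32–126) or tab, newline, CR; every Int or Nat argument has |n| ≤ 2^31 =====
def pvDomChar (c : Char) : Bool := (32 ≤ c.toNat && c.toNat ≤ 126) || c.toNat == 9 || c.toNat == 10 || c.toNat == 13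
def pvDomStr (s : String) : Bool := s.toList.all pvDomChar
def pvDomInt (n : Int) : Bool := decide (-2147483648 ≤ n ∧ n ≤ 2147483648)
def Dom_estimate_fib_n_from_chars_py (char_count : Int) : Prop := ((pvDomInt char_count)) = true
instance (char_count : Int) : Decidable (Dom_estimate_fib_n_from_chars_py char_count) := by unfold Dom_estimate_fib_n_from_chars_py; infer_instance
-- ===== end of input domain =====

-- B replaces A's early-return while-loop by three staged passes: a fibonacci list,
-- a cumulative-totals list, and a binary search (objective: alternative decomposition).

-- ===== PORT A =====
-- the while-True loop of A: state (a, b, total, i); fuel 10001 = the loop's own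
-- iteration cap (the body runs with i = 0..10000; 'if i > 10000: break' then returns i)
def fibLoopA : Nat → Int → Int → Int → Int → Int → Int
  | 0, _, _, _, i, _ => i
  | f + 1, a, b, total, i, cc =>
    let total1 := total + PySem.Str.len (PySem.Int.toStr a)
    let total2 := if i > 0 then total1 + 1 else total1
    if total2 > cc then max 0 i
    else fibLoopA f b (a + b) total2 (i + 1) cc

def estimate_fib_n_from_chars_py (char_count : Int) : Int :=
  fibLoopA 10001 0 1 0 0 char_count

-- ===== PORT B =====
-- stage 1 of Source B: 'for _ in range(10001): fibs.append(a); a, b = b, a + b'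
def fibList : Nat → Int → Int → List Int
  | 0, _, _ => []
  | f + 1, a, b => a :: fibList f b (a + b)

-- stage 2 of Source B: 'for i, f in enumerate(fibs): acc += len(str(f)) + …; totals.append(acc)'
def mkTotals : List Int → Int → Int → List Int
  | [], _, _ => []
  | fv :: rest, acc, i =>
    let acc' := acc + PySem.Str.len (PySem.Int.toStr fv) + (if i > 0 then 1 else 0)
    acc' :: mkTotals rest acc' (i + 1)

-- stage 3 of Source B: the 'while lo < hi' binary search; fuel = totals.length bounds the
-- iteration count (hi - lo shrinks each round); 'totals[mid]' is always in range
-- (0 ≤ lo ≤ mid < hi ≤ len), so getD is exact for Python's totals[mid]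
def bsearch (totals : List Int) (cc : Int) : Nat → Nat → Nat → Nat
  | 0, lo, _ => lo
  | f + 1, lo, hi =>
    if lo < hi then
      let mid := (lo + hi) / 2
      if totals.getD mid 0 ≤ cc then bsearch totals cc f (mid + 1) hi
      else bsearch totals cc f lo mid
    else lo

def estimate_fib_n_from_chars_py_alt (char_count : Int) : Int :=
  let totals := mkTotals (fibList 10001 0 1) 0 0
  (bsearch totals char_count totals.length 0 totals.length : Int)

-- ===== PRECONDITION & SPEC =====
def Spec_estimate_fib_n_from_chars_py (char_count : Int) (out : Int) : Prop := out = estimate_fib_n_from_chars_py_alt char_count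
instance (char_count : Int) (out : Int) : Decidable (Spec_estimate_fib_n_from_chars_py char_count out) := by unfold Spec_estimate_fib_n_from_chars_py; infer_instance

-- ===== CLAIM (what is proved, stated in full; the proofs are below) =====
def Claim_equal_estimate_fib_n_from_chars_py : Prop := ∀ (char_count : Int), Dom_estimate_fib_n_from_chars_py char_count → Spec_estimate_fib_n_from_chars_py char_count (estimate_fib_n_from_chars_py char_count)

-- ===== LEMMAS AND PROOFS =====

-- str(n) is never empty
theorem toDigitsCore_length_le (b : Nat) : ∀ (f n : Nat) (l : List Char),
    l.length ≤ (Nat.toDigitsCore b f n l).length := by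
  intro f
  induction f with
  | zero => intro n l; simp [Nat.toDigitsCore]
  | succ f ih =>
    intro n l
    simp only [Nat.toDigitsCore]
    split
    · simp
    · exact le_trans (by simp) (ih _ _)

theorem toDigitsCore_length_succ (b f n : Nat) (l : List Char) :
    l.length + 1 ≤ (Nat.toDigitsCore b (f + 1) n l).length := by
  simp only [Nat.toDigitsCore]
  split
  · simp
  · exact le_trans (by simp) (toDigitsCore_length_le b f _ _)

theorem one_le_len_toStr (n : Int) : 1 ≤ PySem.Str.len (PySem.Int.toStr n) := by
  have h : 1 ≤ (PySem.Int.toStr n).toList.length := by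
    have hl : (PySem.Int.toStr n).toList = PySem.Int.toChars n := PySem.Int.toList_toStr n
    rw [hl]
    unfold PySem.Int.toChars
    split
    · simp
    · unfold Nat.toDigits
      simpa using toDigitsCore_length_succ 10 (Int.toNat n) (Int.toNat n) []
  rw [PySem.Str.len_eq]
  exact_mod_cast h

-- every element of mkTotals ls acc i is strictly greater than acc
theorem mkTotals_gt : ∀ (ls : List Int) (acc i x : Int),
    x ∈ mkTotals ls acc i → acc < x := by
  intro ls
  induction ls with
  | nil => intro acc i x hx; simp [mkTotals] at hx
  | cons fv rest ih =>
    intro acc i x hx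
    simp only [mkTotals, List.mem_cons] at hx
    have hacc : acc < acc + PySem.Str.len (PySem.Int.toStr fv) + (if i > 0 then 1 else 0) := by
      have h1 := one_le_len_toStr fv
      split <;> omega
    rcases hx with rfl | hx
    · exact hacc
    · exact lt_trans hacc (ih _ _ _ hx)

-- the totals list is strictly increasing
theorem mkTotals_pairwise : ∀ (ls : List Int) (acc i : Int),
    (mkTotals ls acc i).Pairwise (· < ·) := by
  intro ls
  induction ls with
  | nil => intro acc i; simp [mkTotals]
  | cons fv rest ih =>
    intro acc i
    simp only [mkTotals]
    exact List.Pairwise.cons (fun x hx => mkTotals_gt _ _ _ _ hx) (ih _ _)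

-- A's loop computes i + (number of cumulative totals that still fit)
theorem fibLoopA_eq_count : ∀ (f : Nat) (a b total i cc : Int), 0 ≤ i →
    fibLoopA f a b total i cc
      = i + ((mkTotals (fibList f a b) total i).countP (fun t => decide (t ≤ cc)) : Int) := by
  intro f
  induction f with
  | zero => intro a b total i cc _; simp [fibLoopA, fibList, mkTotals]
  | succ f ih =>
    intro a b total i cc hi
    simp only [fibLoopA, fibList, mkTotals]
    have hform : (if i > 0 then total + PySem.Str.len (PySem.Int.toStr a) + 1
                  else total + PySem.Str.len (PySem.Int.toStr a))
        = total + PySem.Str.len (PySem.Int.toStr a) + (if i > 0 then 1 else 0) := by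
      split <;> ring
    set t' := total + PySem.Str.len (PySem.Int.toStr a) + (if i > 0 then 1 else 0) with ht'
    by_cases hcc : t' > cc
    · have hzero : (mkTotals (fibList f b (a + b)) t' (i + 1)).countP (fun t => decide (t ≤ cc)) = 0 := by
        rw [List.countP_eq_zero]
        intro x hx
        have := mkTotals_gt _ _ _ _ hx
        simp only [decide_eq_true_eq]
        omega
      simp only [hform]
      rw [if_pos hcc]
      rw [List.countP_cons]
      simp only [decide_eq_true_eq]
      rw [if_neg (by omega), hzero]
      omega
    · simp only [hform]
      rw [if_neg hcc]
      rw [ih b (a + b) t' (i + 1) cc (by omega)]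
      rw [List.countP_cons]
      simp only [decide_eq_true_eq]
      rw [if_pos (by omega)]
      push_cast
      ring

-- count of elements ≤ cc equals k when the first k indices fit and the rest do not
theorem countP_eq_of_split : ∀ (l : List Int) (cc : Int) (k : Nat), k ≤ l.length →
    (∀ j, j < k → l.getD j 0 ≤ cc) →
    (∀ j, k ≤ j → j < l.length → cc < l.getD j 0) →
    l.countP (fun t => decide (t ≤ cc)) = k := by
  intro l
  induction l with
  | nil => intro cc k hk _ _; simp at hk; simp [hk]
  | cons x xs ih =>
    intro cc k hk hle hgt
    cases k with
    | zero =>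
      rw [List.countP_eq_zero]
      intro y hy
      obtain ⟨j, hj, rfl⟩ := List.mem_iff_getElem.mp hy
      have := hgt j (Nat.zero_le _) hj
      rw [List.getD_eq_getElem _ _ hj] at this
      simp only [decide_eq_true_eq]
      omega
    | succ k' =>
      have hx : x ≤ cc := by simpa using hle 0 (Nat.succ_pos _)
      rw [List.countP_cons]
      simp only [decide_eq_true_eq, if_pos hx]
      have := ih cc k' (by simpa using hk)
        (fun j hj => by simpa using hle (j + 1) (by omega))
        (fun j hj hjl => by simpa using hgt (j + 1) (by omega) (by simpa using hjl))
      omega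

-- the binary search returns the split point = the count of fitting totals
theorem bsearch_eq_count (l : List Int) (cc : Int) (hmono : l.Pairwise (· < ·)) :
    ∀ (f lo hi : Nat), hi ≤ l.length → hi - lo ≤ f → lo ≤ hi →
    (∀ j, j < lo → l.getD j 0 ≤ cc) →
    (∀ j, hi ≤ j → j < l.length → cc < l.getD j 0) →
    bsearch l cc f lo hi = l.countP (fun t => decide (t ≤ cc)) := by
  have hpair : ∀ (p q : Nat), p < q → q < l.length → l.getD p 0 < l.getD q 0 := by
    intro p q hpq hq
    have hp : p < l.length := lt_trans hpq hq
    rw [List.getD_eq_getElem _ _ hp, List.getD_eq_getElem _ _ hq]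
    exact List.pairwise_iff_getElem.mp hmono p q hp hq hpq
  intro f
  induction f with
  | zero =>
    intro lo hi hlen hf hlh hle hgt
    have : lo = hi := by omega
    subst this
    simp only [bsearch]
    exact (countP_eq_of_split l cc lo (le_trans hlh hlen) hle
      (fun j hj hjl => hgt j (by omega) hjl)).symm
  | succ f ih =>
    intro lo hi hlen hf hlh hle hgt
    simp only [bsearch]
    by_cases h : lo < hi
    · rw [if_pos h]
      have hmid1 : lo ≤ (lo + hi) / 2 := by omega
      have hmid2 : (lo + hi) / 2 < hi := by omega
      by_cases hm : l.getD ((lo + hi) / 2) 0 ≤ cc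
      · rw [if_pos hm]
        refine ih ((lo + hi) / 2 + 1) hi hlen (by omega) (by omega) ?_ hgt
        intro j hj
        by_cases hjlo : j < lo
        · exact hle j hjlo
        · rcases Nat.lt_or_ge j ((lo + hi) / 2) with hj2 | hj2
          · exact le_of_lt (lt_of_lt_of_le (hpair j _ hj2 (by omega)) hm)
          · have : j = (lo + hi) / 2 := by omega
            subst this; exact hm
      · rw [if_neg hm]
        refine ih lo ((lo + hi) / 2) (by omega) (by omega) (by omega) hle ?_
        intro j hj hjl
        rcases Nat.lt_or_ge ((lo + hi) / 2) j with hj2 | hj2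
        · exact lt_trans (by omega : cc < l.getD ((lo + hi) / 2) 0) (hpair _ j hj2 hjl)
        · have : j = (lo + hi) / 2 := by omega
          subst this; omega
    · rw [if_neg h]
      have : lo = hi := by omega
      subst this
      exact (countP_eq_of_split l cc lo (le_trans hlh hlen) hle
        (fun j hj hjl => hgt j (by omega) hjl)).symm

-- ===== VERDICT (by name: the statement is the Claim_ definition above) =====
theorem estimate_fib_n_from_chars_py_spec : Claim_equal_estimate_fib_n_from_chars_py := by
  intro cc _
  show estimate_fib_n_from_chars_py cc = estimate_fib_n_from_chars_py_alt cc
  unfold estimate_fib_n_from_chars_py estimate_fib_n_from_chars_py_alt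
  simp only
  rw [fibLoopA_eq_count 10001 0 1 0 0 cc le_rfl]
  have hb := bsearch_eq_count (mkTotals (fibList 10001 0 1) 0 0) cc (mkTotals_pairwise _ _ _)
    (mkTotals (fibList 10001 0 1) 0 0).length 0 (mkTotals (fibList 10001 0 1) 0 0).length
    le_rfl (by omega) (Nat.zero_le _)
    (fun j hj => absurd hj (Nat.not_lt_zero j)) (fun j hj hjl => absurd hjl (by omega))
  rw [hb]
  ring
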